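-- pv_equiv track=rewrite | github.com/AmalAnwar207/Puzzel-Game | puzzel-game.py | puzzle_move
-- ===== SOURCE A (Python) =====
-- def puzzle_move(state_of_puzzle: str, pos: int) :
--     char_to_move = state_of_puzzle[pos]
--     final = []
--     for i in state_of_puzzle:
--         if (i == "-"):
--             final.append(char_to_move)
--         elif i == char_to_move:
--             final.append("-")
--         else:
--             final.append(i)
--     return final
-- ===== SOURCE B (Python) =====
-- def puzzle_move(state_of_puzzle: str, pos: int):
--     char_to_move = state_of_puzzle[pos]
--     blanks = [i for i, ch in enumerate(state_of_puzzle) if ch == "-"]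
--     targets = [i for i, ch in enumerate(state_of_puzzle) if ch == char_to_move]
--     out = list(state_of_puzzle)
--     for i in blanks:
--         out[i] = char_to_move
--     for i in targets:
--         out[i] = "-"
--     return out
-- ===== Notes on version B (the rewrite author's own statement) =====
-- stated objective: alternative
-- what changed: Replaces A's single per-character if/elif/else accumulator pass by staged passes: collect the blank and target-char index lists with enumerate, then positionally overwrite a mutable copy of the string at those indices.
import Mathlib
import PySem

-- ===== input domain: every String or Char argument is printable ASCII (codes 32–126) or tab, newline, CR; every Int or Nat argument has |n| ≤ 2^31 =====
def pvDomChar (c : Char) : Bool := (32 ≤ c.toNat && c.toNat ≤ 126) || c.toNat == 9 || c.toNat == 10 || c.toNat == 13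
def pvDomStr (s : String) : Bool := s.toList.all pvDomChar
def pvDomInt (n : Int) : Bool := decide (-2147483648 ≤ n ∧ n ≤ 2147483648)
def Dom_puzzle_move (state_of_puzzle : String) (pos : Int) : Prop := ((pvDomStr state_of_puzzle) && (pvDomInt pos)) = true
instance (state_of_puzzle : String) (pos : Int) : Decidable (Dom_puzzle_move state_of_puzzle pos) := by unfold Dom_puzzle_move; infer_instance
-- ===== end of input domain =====

-- B replaces A's single per-character if/elif/else pass by staged passes: collect the blank and target index lists, then write the swap positionally into a copy of the string (alternative decomposition; return value only).

-- ===== PORT A =====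
-- A: char_to_move = s[pos]; for each char append char_to_move / "-" / the char.
def puzzle_move (state_of_puzzle : String) (pos : Int) : List String :=
  match PySem.Str.pyGet? state_of_puzzle pos with
  | none => []   -- IndexError; excluded by Pre_
  | some char_to_move =>
    state_of_puzzle.toList.foldl
      (fun final i =>
        if i = '-' then final ++ [String.ofList [char_to_move]]
        else if i = char_to_move then final ++ ["-"]
        else final ++ [String.ofList [i]]) []

-- ===== PORT B =====
-- B: blanks/targets = index lists from enumerate; out = list(s); write char_to_move at blanks, then '-' at targets.
-- (the enumerate indices are ≥ 0, so Python's out[i] = … is List.set i.toNat)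
def puzzle_move_alt (state_of_puzzle : String) (pos : Int) : List String :=
  match PySem.Str.pyGet? state_of_puzzle pos with
  | none => []   -- IndexError; excluded by Pre_
  | some char_to_move =>
    let cs := state_of_puzzle.toList
    let blanks := ((PySem.List.enumerate cs).filter (fun p => p.2 == '-')).map Prod.fst
    let targets := ((PySem.List.enumerate cs).filter (fun p => p.2 == char_to_move)).map Prod.fst
    let out := blanks.foldl (fun a i => a.set i.toNat char_to_move) cs
    let out2 := targets.foldl (fun a i => a.set i.toNat '-') out
    out2.map (fun ch => String.ofList [ch])

-- ===== PRECONDITION & SPEC =====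
-- Pre_: pos is a valid (possibly negative) index into the string; otherwise A raises IndexError.
def Pre_puzzle_move (state_of_puzzle : String) (pos : Int) : Prop :=
  PySem.Raise.InRange state_of_puzzle.toList.length pos
instance (state_of_puzzle : String) (pos : Int) : Decidable (Pre_puzzle_move state_of_puzzle pos) := by unfold Pre_puzzle_move; infer_instance
def pvWitness_puzzle_move : String × Int := ("ab-cd", 1)

def Spec_puzzle_move (state_of_puzzle : String) (pos : Int) (out : List String) : Prop := out = puzzle_move_alt state_of_puzzle pos
instance (state_of_puzzle : String) (pos : Int) (out : List String) : Decidable (Spec_puzzle_move state_of_puzzle pos out) := by unfold Spec_puzzle_move; infer_instance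

-- ===== CLAIM (what is proved, stated in full; the proofs are below) =====
def Claim_equal_puzzle_move : Prop := ∀ (state_of_puzzle : String) (pos : Int), Dom_puzzle_move state_of_puzzle pos → Pre_puzzle_move state_of_puzzle pos → Spec_puzzle_move state_of_puzzle pos (puzzle_move state_of_puzzle pos)

-- ===== LEMMAS AND PROOFS =====

-- length is preserved by the index-write pass
theorem pv_foldl_set_length (I : List Int) (v : Char) (a : List Char) :
    (I.foldl (fun acc i => acc.set i.toNat v) a).length = a.length := by
  induction I generalizing a with
  | nil => rfl
  | cons i I ih => simp [List.foldl, ih, List.length_set]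

-- element j after the index-write pass
theorem pv_foldl_set_getElem? (I : List Int) (v : Char) (a : List Char) (j : Nat)
    (hj : j < a.length) (hI : ∀ i ∈ I, 0 ≤ i) :
    (I.foldl (fun acc i => acc.set i.toNat v) a)[j]? = some (if (j : Int) ∈ I then v else a[j]) := by
  induction I generalizing a with
  | nil => simp [List.getElem?_eq_getElem hj]
  | cons i I ih =>
    have hi : 0 ≤ i := hI i (by simp)
    have hrest : ∀ x ∈ I, 0 ≤ x := fun x hx => hI x (by simp [hx])
    rw [List.foldl_cons, ih (a.set i.toNat v) (by simpa using hj) hrest]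
    by_cases hmem : (j : Int) ∈ I
    · simp [hmem]
    · by_cases hij : i = (j : Int)
      · have hnat : i.toNat = j := by omega
        simp [hmem, hij]
      · have hnat : i.toNat ≠ j := by omega
        simp [hmem, hnat]
        exact fun h' => absurd h'.symm hij

-- membership in the filtered-enumerate index list
theorem pv_mem_enum_filter (cs : List Char) (v : Char) (k : Int) (j : Int) :
    (j ∈ ((PySem.List.enumerate cs k).filter (fun p => p.2 == v)).map Prod.fst)
      ↔ ∃ n : Nat, ∃ h : n < cs.length, j = k + n ∧ cs[n] = v := by
  induction cs generalizing k with
  | nil => simp [PySem.List.enumerate]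
  | cons c cs ih =>
    have hstep : PySem.List.enumerate (c :: cs) k = (k, c) :: PySem.List.enumerate cs (k + 1) := by
      simp [PySem.List.enumerate]
    rw [hstep, List.filter_cons]
    by_cases hv : c = v
    · rw [if_pos (by simp [hv]), List.map_cons]
      constructor
      · intro h
        rcases List.mem_cons.1 h with h | h
        · exact ⟨0, by simp, by simpa using h, by simpa using hv⟩
        · rcases (ih (k + 1)).1 h with ⟨n, hn, hj, he⟩
          exact ⟨n + 1, by simpa using hn, by push_cast at hj ⊢; omega, by simpa using he⟩
      · rintro ⟨n, hn, hj, he⟩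
        match n with
        | 0 => exact List.mem_cons.2 (Or.inl (by simpa using hj))
        | n + 1 =>
          exact List.mem_cons.2 (Or.inr ((ih (k + 1)).2
            ⟨n, by simpa using hn, by push_cast at hj ⊢; omega, by simpa using he⟩))
    · rw [if_neg (by simpa using hv)]
      rw [ih (k + 1)]
      constructor
      · rintro ⟨n, hn, hj, he⟩
        exact ⟨n + 1, by simpa using hn, by push_cast at hj ⊢; omega, by simpa using he⟩
      · rintro ⟨n, hn, hj, he⟩
        match n with
        | 0 => exact absurd (by simpa using he) hv
        | n + 1 =>
          exact ⟨n, by simpa using hn, by push_cast at hj ⊢; omega, by simpa using he⟩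

-- every listed index is nonnegative
theorem pv_enum_filter_nonneg (cs : List Char) (v : Char) (j : Int)
    (h : j ∈ ((PySem.List.enumerate cs (0:Int)).filter (fun p => p.2 == v)).map Prod.fst) : 0 ≤ j := by
  rcases (pv_mem_enum_filter cs v 0 j).1 h with ⟨n, _, hj, _⟩
  omega

-- ===== VERDICT (by name: the statement is the Claim_ definition above) =====
theorem puzzle_move_spec : Claim_equal_puzzle_move := by
  intro s pos _ _
  unfold Spec_puzzle_move puzzle_move puzzle_move_alt
  cases h : PySem.Str.pyGet? s pos with
  | none => rfl
  | some c =>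
    simp only []
    set cs := s.toList with hcs
    -- A's side: the append loop is a map
    have hfun : (fun (final : List String) (i : Char) =>
        if i = '-' then final ++ [String.ofList [c]]
        else if i = c then final ++ ["-"] else final ++ [String.ofList [i]])
      = (fun final i => final ++ [if i = '-' then String.ofList [c]
          else if i = c then "-" else String.ofList [i]]) := by
      funext final i; split_ifs <;> rfl
    rw [hfun, PySem.List.foldl_append_singleton_eq_map]
    simp only [List.nil_append]
    -- B's side, elementwise
    apply List.ext_getElem
    · simp [pv_foldl_set_length]
    · intro j hj1 hj2
      have hjlen : j < cs.length := by simpa using hj1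
      have hlen1 : j < (((PySem.List.enumerate cs (0:Int)).filter (fun p => p.2 == '-')).map Prod.fst |>.foldl (fun a i => a.set i.toNat c) cs).length := by
        rw [pv_foldl_set_length]; exact hjlen
      have hB := pv_foldl_set_getElem? (((PySem.List.enumerate cs (0:Int)).filter (fun p => p.2 == '-')).map Prod.fst) c cs j hjlen
        (fun i hi => pv_enum_filter_nonneg cs '-' i hi)
      have hT := pv_foldl_set_getElem? (((PySem.List.enumerate cs (0:Int)).filter (fun p => p.2 == c)).map Prod.fst) '-'
        (((PySem.List.enumerate cs (0:Int)).filter (fun p => p.2 == '-')).map Prod.fst |>.foldl (fun a i => a.set i.toNat c) cs)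
        j hlen1 (fun i hi => pv_enum_filter_nonneg cs c i hi)
      rw [List.getElem?_eq_getElem (by rw [pv_foldl_set_length]; exact hjlen)] at hB
      rw [List.getElem?_eq_getElem (by rw [pv_foldl_set_length, pv_foldl_set_length]; exact hjlen)] at hT
      have hB' := Option.some.inj hB
      have hT' := Option.some.inj hT
      simp only [List.getElem_map]
      rw [hT', hB']
      have hmemT : ((j:Int) ∈ ((PySem.List.enumerate cs (0:Int)).filter (fun p => p.2 == c)).map Prod.fst) ↔ cs[j] = c := by
        rw [pv_mem_enum_filter]
        constructor
        · rintro ⟨n, hn, hjn, he⟩; have : n = j := by omega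
          subst this; exact he
        · intro he; exact ⟨j, hjlen, by omega, he⟩
      have hmemB : ((j:Int) ∈ ((PySem.List.enumerate cs (0:Int)).filter (fun p => p.2 == '-')).map Prod.fst) ↔ cs[j] = '-' := by
        rw [pv_mem_enum_filter]
        constructor
        · rintro ⟨n, hn, hjn, he⟩; have : n = j := by omega
          subst this; exact he
        · intro he; exact ⟨j, hjlen, by omega, he⟩
      by_cases hT2 : cs[j] = c
      · by_cases hB2 : cs[j] = '-'
        · simp [hmemT.2 hT2, hB2, ← hT2]
        · simp [hmemT.2 hT2, hB2, hT2]
          exact fun h' => absurd (hT2.trans h') hB2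
      · have hnT : ¬ ((j:Int) ∈ ((PySem.List.enumerate cs (0:Int)).filter (fun p => p.2 == c)).map Prod.fst) :=
          fun hm => hT2 (hmemT.1 hm)
        by_cases hB2 : cs[j] = '-'
        · simp [hB2, hT2, hmemB.2 hB2, hnT]
        · have hnB : ¬ ((j:Int) ∈ ((PySem.List.enumerate cs (0:Int)).filter (fun p => p.2 == '-')).map Prod.fst) :=
            fun hm => hB2 (hmemB.1 hm)
          simp [hB2, hT2, hnT, hnB]
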